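-- pv_equiv track=rewrite | github.com/pavitagrawal/pavitagrawal | 230953406 ISLab/PCCheckPracticr.py | playfair_process_text
-- ===== SOURCE A (Python) =====
-- def playfair_process_text(text):
--     text = text.upper().replace("J", "I")
--     processed = ""
--     i = 0
--     while i < len(text):
--         a = text[i]
--         b = text[i+1] if i+1 < len(text) else "X"
--         if a == b:
--             processed += a + "X"
--             i += 1
--         else:
--             processed += a + b
--             i += 2
--     if len(processed) % 2 != 0:
--         processed += "X"
--     return processed
-- ===== SOURCE B (Python) =====
-- def playfair_process_text(text):
--     text = text.upper().replace("J", "I")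
--     out = []
--     pending = ""
--     for c in text:
--         if not pending:
--             pending = c
--         elif pending == c:
--             out.append(pending + "X")
--             pending = c
--         else:
--             out.append(pending + c)
--             pending = ""
--     if pending:
--         out.append(pending + "X")
--     return "".join(out)
-- ===== Notes on version B (the rewrite author's own statement) =====
-- stated objective: simpler
-- what changed: Replaces the index-based while loop with look-ahead indexing, quadratic string concatenation, and the unreachable final parity padding by a single for-loop over the characters carrying a pending character, appending digraphs to a list joined once.
import Mathlib
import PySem

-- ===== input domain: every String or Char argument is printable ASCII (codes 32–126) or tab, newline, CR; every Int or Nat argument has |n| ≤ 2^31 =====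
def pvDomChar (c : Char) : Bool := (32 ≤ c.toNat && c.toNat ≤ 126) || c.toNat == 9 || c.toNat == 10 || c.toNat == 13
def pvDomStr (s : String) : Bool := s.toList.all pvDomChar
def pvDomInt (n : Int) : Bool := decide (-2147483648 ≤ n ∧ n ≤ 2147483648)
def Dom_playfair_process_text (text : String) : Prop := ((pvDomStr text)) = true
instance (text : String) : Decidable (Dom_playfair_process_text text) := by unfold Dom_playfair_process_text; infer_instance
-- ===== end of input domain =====

-- B replaces A's index-based while loop (with look-ahead and the unreachable final
-- parity pad) by a single pass carrying a pending character; return values agree.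

-- ===== PORT A =====
-- the while loop of A: index i over the character list, look-ahead at i+1
def pvALoop (cs : List Char) (i : Nat) : List Char :=
  if h : i < cs.length then
    let a := cs[i]
    let b := if h2 : i + 1 < cs.length then cs[i+1] else 'X'
    if a == b then a :: 'X' :: pvALoop cs (i + 1)
    else a :: b :: pvALoop cs (i + 2)
  else []
termination_by cs.length - i

def playfair_process_text (text : String) : String :=
  let t := (PySem.Str.replace (PySem.Str.upper text) "J" "I").toList
  let processed := pvALoop t 0
  let processed := if processed.length % 2 ≠ 0 then processed ++ ['X'] else processed
  String.mk processed

-- ===== PORT B =====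
-- B's for-loop: carry a pending character, flush completed digraphs
def pvBLoop (pending : Option Char) (cs : List Char) : List Char :=
  match cs with
  | [] =>
    match pending with
    | some p => [p, 'X']
    | none => []
  | c :: rest =>
    match pending with
    | none => pvBLoop (some c) rest
    | some p =>
      if p == c then p :: 'X' :: pvBLoop (some c) rest
      else p :: c :: pvBLoop none rest

def playfair_process_text_alt (text : String) : String :=
  let t := (PySem.Str.replace (PySem.Str.upper text) "J" "I").toList
  String.mk (pvBLoop none t)

-- ===== PRECONDITION & SPEC =====
def Spec_playfair_process_text (text : String) (out : String) : Prop := out = playfair_process_text_alt text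
instance (text : String) (out : String) : Decidable (Spec_playfair_process_text text out) := by unfold Spec_playfair_process_text; infer_instance

-- ===== CLAIM (what is proved, stated in full; the proofs are below) =====
def Claim_equal_playfair_process_text : Prop := ∀ (text : String), Dom_playfair_process_text text → Spec_playfair_process_text text (playfair_process_text text)

-- ===== LEMMAS AND PROOFS =====

-- canonical digraph recursion, used to relate both loops
def pvG : List Char → List Char
  | [] => []
  | [a] => if a == 'X' then ['X', 'X'] else [a, 'X']
  | a :: b :: rest => if a == b then a :: 'X' :: pvG (b :: rest) else a :: b :: pvG rest

theorem pvALoop_drop : ∀ (n : Nat) (cs : List Char) (i : Nat), cs.length - i ≤ n →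
    pvALoop cs i = pvG (cs.drop i) := by
  intro n
  induction n with
  | zero =>
    intro cs i h
    have : ¬ i < cs.length := by omega
    rw [pvALoop, dif_neg this, List.drop_eq_nil_of_le (by omega), pvG]
  | succ n ih =>
    intro cs i h
    by_cases hi : i < cs.length
    · rw [pvALoop, dif_pos hi]
      have hdrop : cs.drop i = cs[i] :: cs.drop (i + 1) := List.drop_eq_getElem_cons hi
      by_cases hi1 : i + 1 < cs.length
      · have hdrop1 : cs.drop (i + 1) = cs[i+1] :: cs.drop (i + 2) := List.drop_eq_getElem_cons hi1
        simp only [dif_pos hi1]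
        by_cases hab : cs[i] == cs[i+1]
        · simp only [hab, if_pos]
          rw [hdrop, hdrop1, pvG, if_pos hab, ← hdrop1, ih cs (i + 1) (by omega)]
        · simp only [hab, if_neg, Bool.false_eq_true, not_false_iff]
          rw [hdrop, hdrop1, pvG, if_neg (by simpa using hab), ih cs (i + 2) (by omega)]
      · have hlast : cs.drop (i + 1) = [] := List.drop_eq_nil_of_le (by omega)
        simp only [dif_neg hi1]
        rw [hdrop, hlast, pvG]
        by_cases hx : cs[i] == 'X'
        · simp only [hx, if_pos]
          rw [ih cs (i + 1) (by omega), hlast, pvG]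
          have := beq_iff_eq.mp hx
          simp [this]
        · simp only [hx, Bool.false_eq_true, if_neg, not_false_iff]
          rw [ih cs (i + 2) (by omega), List.drop_eq_nil_of_le (by omega), pvG]
    · rw [pvALoop, dif_neg hi, List.drop_eq_nil_of_le (by omega), pvG]

theorem pvBLoop_eq_pvG : ∀ (n : Nat) (cs : List Char), cs.length ≤ n →
    pvBLoop none cs = pvG cs ∧ ∀ a, pvBLoop (some a) cs = pvG (a :: cs) := by
  intro n
  induction n with
  | zero =>
    intro cs h
    have : cs = [] := List.eq_nil_of_length_eq_zero (by omega)
    subst this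
    refine ⟨rfl, fun a => ?_⟩
    rw [pvBLoop, pvG]
    by_cases hx : a == 'X'
    · have := beq_iff_eq.mp hx; simp [this]
    · simp [hx]
  | succ n ih =>
    intro cs h
    constructor
    · match cs with
      | [] => rfl
      | c :: rest =>
        rw [pvBLoop]
        exact (ih rest (by simp at h; omega)).2 c
    · intro a
      match cs with
      | [] =>
        rw [pvBLoop, pvG]
        by_cases hx : a == 'X'
        · have := beq_iff_eq.mp hx; simp [this]
        · simp [hx]
      | c :: rest =>
        rw [pvBLoop, pvG]
        by_cases hac : a == c
        · simp only [hac, if_pos]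
          rw [(ih rest (by simp at h; omega)).2 c]
        · simp only [hac, Bool.false_eq_true, if_neg, not_false_iff]
          rw [(ih rest (by simp at h; omega)).1]

theorem pvG_length_even : ∀ (n : Nat) (cs : List Char), cs.length ≤ n → (pvG cs).length % 2 = 0 := by
  intro n
  induction n with
  | zero =>
    intro cs h
    have : cs = [] := List.eq_nil_of_length_eq_zero (by omega)
    subst this; rfl
  | succ n ih =>
    intro cs h
    match cs with
    | [] => rfl
    | [a] =>
      rw [pvG]; split <;> simp
    | a :: b :: rest =>
      rw [pvG]
      split
      · have := ih (b :: rest) (by simp at h ⊢; omega)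
        simp only [List.length_cons]
        omega
      · have := ih rest (by simp at h; omega)
        simp only [List.length_cons]
        omega

-- ===== VERDICT (by name: the statement is the Claim_ definition above) =====
theorem playfair_process_text_spec : Claim_equal_playfair_process_text := by
  intro text _
  unfold Spec_playfair_process_text playfair_process_text playfair_process_text_alt
  simp only
  set t := (PySem.Str.replace (PySem.Str.upper text) "J" "I").toList with ht
  rw [pvALoop_drop t.length t 0 (by omega), List.drop_zero,
    (pvBLoop_eq_pvG t.length t le_rfl).1]
  rw [if_neg (by simp [pvG_length_even t.length t le_rfl])]
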